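-- pv_equiv track=rewrite | github.com/mjc239/aoc23 | aoc23/day10.py | count_inside_loop
-- ===== SOURCE A (Python) =====
-- def count_inside_loop(
--     input_list: list[str], loop_index_dict: dict[tuple[int], int]
-- ) -> int:
--     # Array size
--     n_rows = len(input_list)
--     n_cols = len(input_list[0])
--
--     # Keep track of the inside tiles
--     num_inside_loop = 0
--
--     # Iterate over tiles line by line
--     for i in range(n_rows):
--         # Always start a row outside the loop
--         inside_loop = False
--
--         # Keep track of the loop tile section when crossing
--         loop_tile_list = []
--
--         for j in range(n_cols):
--             tile = input_list[i][j]
--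
--             # Is this a loop tile? Check the loop_index_dict
--             is_loop_tile = (i, j) in loop_index_dict
--
--             if is_loop_tile:
--                 if tile == "|":
--                     # Switch from in <-> out
--                     inside_loop = not inside_loop
--                     loop_tile_list = []
--
--                 elif tile in ["-", "F", "L"]:
--                     # Start/middle of loop tile section
--                     loop_tile_list.append(tile)
--
--                 elif (loop_tile_list[0] == "F" and tile == "7") or (
--                     loop_tile_list[0] == "L" and tile == "J"
--                 ):
--                     # F7 or LJ type - not a true crossing
--                     loop_tile_list = []
--
--                 elif (loop_tile_list[0] == "F" and tile == "J") or (
--                     loop_tile_list[0] == "L" and tile == "7"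
--                 ):
--                     # FJ or L7 type - switch from in <-> out
--                     inside_loop = not inside_loop
--                     loop_tile_list = []
--
--             elif inside_loop:
--                 # Add to the counter if inside loop
--                 num_inside_loop += 1
--
--     return num_inside_loop
-- ===== SOURCE B (Python) =====
-- def count_inside_loop(input_list, loop_index_dict):
--     num_inside_loop = 0
--     for i, row in enumerate(input_list):
--         inside = False
--         for j in range(len(input_list[0])):
--             if (i, j) in loop_index_dict:
--                 if row[j] in "|LJ":
--                     inside = not inside
--             elif inside:
--                 num_inside_loop += 1
--     return num_inside_loop
-- ===== Notes on version B (the rewrite author's own statement) =====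
-- stated objective: simpler
-- what changed: B discards A's loop_tile_list run state machine entirely: one boolean is kept and flipped exactly on loop tiles that connect north ('|','L','J'), which yields the same ray-casting parity.
-- outside the precondition, e.g. on count_inside_loop(['L.7'], {(0, 0): 0, (0, 2): 0}): A returns 0, B returns 1; on count_inside_loop(['7.'], {(0, 0): 0}): A raises IndexError, B returns 0
import Mathlib
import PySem

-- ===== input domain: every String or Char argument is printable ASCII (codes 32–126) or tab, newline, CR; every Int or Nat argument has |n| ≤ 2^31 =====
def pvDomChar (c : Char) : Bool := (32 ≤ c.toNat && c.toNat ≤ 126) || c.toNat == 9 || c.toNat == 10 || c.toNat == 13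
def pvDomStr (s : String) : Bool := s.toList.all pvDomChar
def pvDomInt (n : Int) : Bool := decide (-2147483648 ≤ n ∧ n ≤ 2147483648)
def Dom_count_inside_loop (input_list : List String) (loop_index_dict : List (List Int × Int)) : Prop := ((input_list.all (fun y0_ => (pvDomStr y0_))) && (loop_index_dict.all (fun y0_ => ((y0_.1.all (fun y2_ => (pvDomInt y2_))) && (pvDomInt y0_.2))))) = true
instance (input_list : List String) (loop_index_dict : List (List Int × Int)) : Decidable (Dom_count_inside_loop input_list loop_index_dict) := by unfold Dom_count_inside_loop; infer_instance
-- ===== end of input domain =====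

-- B drops A's loop_tile_list state machine: it keeps only the inside/outside boolean and flips it
-- exactly on loop tiles that connect north ('|', 'L', 'J') — same ray-casting parity, no list state (objective: simpler).

-- ===== PORT A =====
-- '(i, j) in loop_index_dict' (dict membership; keys are unique in a Python dict, so `any` = first match)
def pvIsLoop (d : List (List Int × Int)) (i j : Int) : Bool :=
  d.any (fun kv => kv.1 == [i, j])

-- body of A's inner loop; `none` = the IndexError raised by `loop_tile_list[0]` on an empty list
def pvAStep (num : Int) (inside : Bool) (ltl : List Char) (tile : Char) (isLoopTile : Bool) :
    Option (Int × Bool × List Char) :=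
  if isLoopTile then
    if tile = '|' then some (num, !inside, ([] : List Char))
    else if tile = '-' ∨ tile = 'F' ∨ tile = 'L' then some (num, inside, ltl ++ [tile])
    else
      match ltl with
      | [] => none
      | h :: _ =>
        if (h = 'F' ∧ tile = '7') ∨ (h = 'L' ∧ tile = 'J') then some (num, inside, ([] : List Char))
        else if (h = 'F' ∧ tile = 'J') ∨ (h = 'L' ∧ tile = '7') then some (num, !inside, ([] : List Char))
        else some (num, inside, ltl)
  else if inside then some (num + 1, inside, ltl) else some (num, inside, ltl)

def count_inside_loop (input_list : List String) (loop_index_dict : List (List Int × Int)) : Int :=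
  let n_rows : Int := input_list.length
  match PySem.List.pyGet? input_list 0 with
  | none => 0   -- len(input_list[0]) raises IndexError on []; excluded by Pre_
  | some r0 =>
    let n_cols : Int := PySem.Str.len r0
    ((PySem.List.pyRange 0 n_rows 1).foldl
      (fun acc i =>
        acc.bind (fun num =>
          ((PySem.List.pyRange 0 n_cols 1).foldl
            (fun st j =>
              st.bind (fun s =>
                ((PySem.List.pyGet? input_list i).bind
                  (fun row => PySem.Str.pyGet? row j)).bind
                  (fun tile => pvAStep s.1 s.2.1 s.2.2 tile (pvIsLoop loop_index_dict i j))))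
            (some (num, false, ([] : List Char)))).map (fun s => s.1)))
      (some 0)).getD 0

-- ===== PORT B =====
def count_inside_loop_alt (input_list : List String) (loop_index_dict : List (List Int × Int)) : Int :=
  ((PySem.List.enumerate input_list 0).foldl
    (fun num p =>
      ((PySem.List.pyRange 0 (PySem.Str.len (PySem.List.pyGetD input_list 0 "")) 1).foldl
        (fun (st : Int × Bool) j =>
          if pvIsLoop loop_index_dict p.1 j then
            -- row[j] in "|LJ"; the IndexError default ' ' is unreachable under Pre_
            (if (PySem.Str.pyGet? p.2 j).getD ' ' = '|' ∨ (PySem.Str.pyGet? p.2 j).getD ' ' = 'L'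
                ∨ (PySem.Str.pyGet? p.2 j).getD ' ' = 'J' then (st.1, !st.2) else st)
          else if st.2 then (st.1 + 1, st.2) else st)
        (num, false)).1)
    0)

-- ===== PRECONDITION & SPEC =====
-- shape grammar of one row as A scans it: the loop tiles of each row must form well-formed
-- crossings: '|' anywhere; a run opened by 'F' may contain any non-corner tiles and may stay open or be
-- closed by '7'/'J'/'|'; a run opened by 'L' must consist of plain run tiles closed by '7' or 'J'
mutual
def pvRowOK : List (Char × Bool) → Bool
  | [] => true
  | (c, b) :: r =>
    if !b then pvRowOK r
    else if c = '|' then pvRowOK r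
    else if c = 'F' then pvFrunOK r
    else if c = 'L' then pvLrunOK r
    else false
def pvFrunOK : List (Char × Bool) → Bool
  | [] => true
  | (c, b) :: r =>
    if !b then pvFrunOK r
    else if c = '7' ∨ c = 'J' then pvRowOK r
    else if c = '|' then pvRowOK r
    else if c = 'L' then false
    else pvFrunOK r
def pvLrunOK : List (Char × Bool) → Bool
  | [] => true
  | (c, b) :: r =>
    if !b then false
    else if c = '7' ∨ c = 'J' then pvRowOK r
    else if c = '|' ∨ c = 'F' ∨ c = 'L' then false
    else pvLrunOK r
end

-- row i as the list of (tile, is-loop-tile) pairs A and B traverse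
def pvPairs (d : List (List Int × Int)) (i : Nat) (s : String) (n : Nat) : List (Char × Bool) :=
  (List.range n).map (fun j => (s.toList.getD j ' ', pvIsLoop d i j))

-- Pre_ excludes inputs on which A raises IndexError (empty grid, a row shorter than row 0, a corner
-- loop tile reached with no open run) and malformed rows whose loop tiles do not form well-formed
-- ray-casting crossings — there the loop is not a valid pipe loop and any returned parity is an
-- accident of A's leftover run state, a corner nobody would specify.
def Pre_count_inside_loop (input_list : List String) (loop_index_dict : List (List Int × Int)) : Prop :=
  input_list ≠ [] ∧
  (∀ s ∈ input_list, (input_list.headD "").toList.length ≤ s.toList.length) ∧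
  (∀ i < input_list.length,
    pvRowOK (pvPairs loop_index_dict i (input_list.getD i "") (input_list.headD "").toList.length) = true)
instance (input_list : List String) (loop_index_dict : List (List Int × Int)) : Decidable (Pre_count_inside_loop input_list loop_index_dict) := by unfold Pre_count_inside_loop; infer_instance

def pvWitness_count_inside_loop : List String × (List (List Int × Int)) :=
  (["F-7", "|.|", "L-J"],
   [([0,0],1),([0,1],1),([0,2],1),([1,0],1),([1,2],1),([2,0],1),([2,1],1),([2,2],1)])

def Spec_count_inside_loop (input_list : List String) (loop_index_dict : List (List Int × Int)) (out : Int) : Prop := out = count_inside_loop_alt input_list loop_index_dict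
instance (input_list : List String) (loop_index_dict : List (List Int × Int)) (out : Int) : Decidable (Spec_count_inside_loop input_list loop_index_dict out) := by unfold Spec_count_inside_loop; infer_instance

-- ===== CLAIM (what is proved, stated in full; the proofs are below) =====
def Claim_equal_count_inside_loop : Prop := ∀ (input_list : List String) (loop_index_dict : List (List Int × Int)), Dom_count_inside_loop input_list loop_index_dict → Pre_count_inside_loop input_list loop_index_dict → Spec_count_inside_loop input_list loop_index_dict (count_inside_loop input_list loop_index_dict)

-- ===== LEMMAS AND PROOFS =====

-- canonical per-row folds, over the (tile, is-loop) pair list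
def pvBStep (st : Int × Bool) (c : Char) (b : Bool) : Int × Bool :=
  if b then (if c = '|' ∨ c = 'L' ∨ c = 'J' then (st.1, !st.2) else st)
  else if st.2 then (st.1 + 1, st.2) else st

def pvRowA (pl : List (Char × Bool)) (st : Option (Int × Bool × List Char)) :
    Option (Int × Bool × List Char) :=
  pl.foldl (fun st p => st.bind (fun s => pvAStep s.1 s.2.1 s.2.2 p.1 p.2)) st

def pvRowB (pl : List (Char × Bool)) (st : Int × Bool) : Int × Bool :=
  pl.foldl (fun st p => pvBStep st p.1 p.2) st

-- scan mode: none = between runs (A's list empty), some false = inside an F-run, some true = inside an L-run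
def pvMList : Option Bool → List Char → List Char
  | none, _ => []
  | some false, t => 'F' :: t
  | some true, t => 'L' :: t
def pvMIns : Option Bool → Bool → Bool
  | none, i => i
  | some false, i => i
  | some true, i => !i
def pvMOK : Option Bool → List (Char × Bool) → Bool
  | none, pl => pvRowOK pl
  | some false, pl => pvFrunOK pl
  | some true, pl => pvLrunOK pl

theorem pvRowA_cons (p : Char × Bool) (r : List (Char × Bool)) (st : Option (Int × Bool × List Char)) :
    pvRowA (p :: r) st = pvRowA r (st.bind (fun s => pvAStep s.1 s.2.1 s.2.2 p.1 p.2)) := rfl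

theorem pvRowB_cons (p : Char × Bool) (r : List (Char × Bool)) (st : Int × Bool) :
    pvRowB (p :: r) st = pvRowB r (pvBStep st p.1 p.2) := rfl

theorem pvMain (pl : List (Char × Bool)) : ∀ (mode : Option Bool) (num : Int) (ins : Bool) (tail : List Char),
    pvMOK mode pl = true →
    (pvRowA pl (some (num, ins, pvMList mode tail))).map (fun s => s.1)
      = some ((pvRowB pl (num, pvMIns mode ins)).1) := by
  induction pl with
  | nil =>
    intro mode num ins tail _
    cases mode with
    | none => simp [pvRowA, pvRowB]
    | some bm => cases bm <;> simp [pvRowA, pvRowB]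
  | cons p r ih =>
    obtain ⟨c, b⟩ := p
    intro mode num ins tail h
    rw [pvRowA_cons, pvRowB_cons]
    cases b with
    | false =>
      cases mode with
      | none =>
        have h' : pvRowOK r = true := by simpa [pvMOK, pvRowOK] using h
        cases ins <;> simpa [pvAStep, pvBStep, pvMList, pvMIns] using ih none _ _ tail h'
      | some bm =>
        cases bm with
        | false =>
          have h' : pvFrunOK r = true := by simpa [pvMOK, pvFrunOK] using h
          cases ins <;> simpa [pvAStep, pvBStep, pvMList, pvMIns] using ih (some false) _ _ tail h'
        | true =>
          exfalso; simp [pvMOK, pvLrunOK] at h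
    | true =>
      cases mode with
      | none =>
        by_cases h1 : c = '|'
        · subst h1
          have h' : pvRowOK r = true := by simpa [pvMOK, pvRowOK] using h
          simpa [pvAStep, pvBStep, pvMList, pvMIns] using ih none num (!ins) tail h'
        · by_cases h2 : c = 'F'
          · subst h2
            have h' : pvFrunOK r = true := by simpa [pvMOK, pvRowOK] using h
            simpa [pvAStep, pvBStep, pvMList, pvMIns] using ih (some false) num ins [] h'
          · by_cases h3 : c = 'L'
            · subst h3
              have h' : pvLrunOK r = true := by simpa [pvMOK, pvRowOK] using h
              simpa [pvAStep, pvBStep, pvMList, pvMIns] using ih (some true) num ins [] h'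
            · exfalso; simp [pvMOK, pvRowOK, h1, h2, h3] at h
      | some bm =>
        cases bm with
        | false =>
          -- inside an F-run: A's list is 'F' :: tail, B agrees on inside
          by_cases h7 : c = '7' ∨ c = 'J'
          · have h' : pvRowOK r = true := by simpa [pvMOK, pvFrunOK, h7] using h
            rcases h7 with rfl | rfl
            · simpa [pvAStep, pvBStep, pvMList, pvMIns] using ih none num ins tail h'
            · simpa [pvAStep, pvBStep, pvMList, pvMIns] using ih none num (!ins) tail h'
          · by_cases h1 : c = '|'
            · subst h1
              have h' : pvRowOK r = true := by simpa [pvMOK, pvFrunOK] using h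
              simpa [pvAStep, pvBStep, pvMList, pvMIns] using ih none num (!ins) tail h'
            · by_cases h3 : c = 'L'
              · exfalso; subst h3; simp [pvMOK, pvFrunOK] at h
              · have h' : pvFrunOK r = true := by
                  simpa [pvMOK, pvFrunOK, h7, h1, h3] using h
                by_cases h2 : c = 'F'
                · subst h2
                  simpa [pvAStep, pvBStep, pvMList, pvMIns] using
                    ih (some false) num ins (tail ++ ['F']) h'
                · by_cases hd : c = '-'
                  · subst hd
                    simpa [pvAStep, pvBStep, pvMList, pvMIns] using
                      ih (some false) num ins (tail ++ ['-']) h'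
                  · have hc7 : c ≠ '7' := fun hc => h7 (Or.inl hc)
                    have hcJ : c ≠ 'J' := fun hc => h7 (Or.inr hc)
                    simpa [pvAStep, pvBStep, pvMList, pvMIns, h1, h2, h3, hd, hc7, hcJ] using
                      ih (some false) num ins tail h'
        | true =>
          -- inside an L-run: A's list is 'L' :: tail, B's inside is the NEGATION of A's
          by_cases h7 : c = '7' ∨ c = 'J'
          · have h' : pvRowOK r = true := by simpa [pvMOK, pvLrunOK, h7] using h
            rcases h7 with rfl | rfl
            · simpa [pvAStep, pvBStep, pvMList, pvMIns] using ih none num (!ins) tail h'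
            · simpa [pvAStep, pvBStep, pvMList, pvMIns] using ih none num ins tail h'
          · by_cases hbad : c = '|' ∨ c = 'F' ∨ c = 'L'
            · exfalso; simp [pvMOK, pvLrunOK, h7, hbad] at h
            · push Not at hbad
              obtain ⟨h1, h2, h3⟩ := hbad
              have h' : pvLrunOK r = true := by
                simpa [pvMOK, pvLrunOK, h7, h1, h2, h3] using h
              by_cases hd : c = '-'
              · subst hd
                simpa [pvAStep, pvBStep, pvMList, pvMIns] using
                  ih (some true) num ins (tail ++ ['-']) h'
              · have hc7 : c ≠ '7' := fun hc => h7 (Or.inl hc)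
                have hcJ : c ≠ 'J' := fun hc => h7 (Or.inr hc)
                simpa [pvAStep, pvBStep, pvMList, pvMIns, h1, h2, h3, hd, hc7, hcJ] using
                  ih (some true) num ins tail h'

theorem pvRow_eq (pl : List (Char × Bool)) (num : Int) (h : pvRowOK pl = true) :
    (pvRowA pl (some (num, false, ([] : List Char)))).map (fun s => s.1)
      = some ((pvRowB pl (num, false)).1) :=
  pvMain pl none num false [] h

theorem pvFoldMap (l : List Nat) (f : Int → Nat → Int) :
    ∀ x : Int, l.foldl (fun acc i => (acc.bind (fun num => some (f num i)) : Option Int)) (some x)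
      = some (l.foldl f x) := by
  induction l with
  | nil => intro x; rfl
  | cons i r ih => intro x; simpa using ih (f x i)

theorem pvBridgeA (il : List String) (d : List (List Int × Int)) (i n : Nat) (hi : i < il.length)
    (hs : n ≤ (il.getD i "").toList.length) (init : Option (Int × Bool × List Char)) :
    (PySem.List.pyRange 0 (n : Int) 1).foldl
      (fun st j => st.bind (fun s =>
        ((PySem.List.pyGet? il (i : Int)).bind (fun row => PySem.Str.pyGet? row j)).bind
          (fun tile => pvAStep s.1 s.2.1 s.2.2 tile (pvIsLoop d (i : Int) j)))) init
    = pvRowA (pvPairs d i (il.getD i "") n) init := by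
  have hrow : PySem.List.pyGet? il (i : Int) = some (il.getD i "") := by
    rw [PySem.List.pyGet?_natCast, List.getElem?_eq_getElem hi, List.getD_eq_getElem _ _ hi]
  rw [PySem.List.pyRange_zero_nat, List.foldl_map, pvRowA, pvPairs, List.foldl_map]
  apply PySem.List.foldl_congr_mem
  intro acc j hj
  have hj' : j < n := List.mem_range.mp hj
  have hlt : j < (il.getD i "").toList.length := lt_of_lt_of_le hj' hs
  have hchar : PySem.Str.pyGet? (il.getD i "") (j : Int)
      = some ((il.getD i "").toList.getD j ' ') := by
    rw [PySem.Str.pyGet?_natCast, List.getElem?_eq_getElem hlt, List.getD_eq_getElem _ _ hlt]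
  simp only [hrow]
  have hsb : ((some ((il.getD i "")) : Option String).bind fun row => PySem.Str.pyGet? row (j : Int))
      = some ((il.getD i "").toList.getD j ' ') := hchar
  simp only [hsb]
  rfl

theorem pvBridgeB (il : List String) (d : List (List Int × Int)) (i n : Nat)
    (hs : n ≤ (il.getD i "").toList.length) (init : Int × Bool) :
    (PySem.List.pyRange 0 (n : Int) 1).foldl
      (fun (st : Int × Bool) j =>
        if pvIsLoop d (i : Int) j then
          (if (PySem.Str.pyGet? (il.getD i "") j).getD ' ' = '|'
              ∨ (PySem.Str.pyGet? (il.getD i "") j).getD ' ' = 'L'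
              ∨ (PySem.Str.pyGet? (il.getD i "") j).getD ' ' = 'J' then (st.1, !st.2) else st)
        else if st.2 then (st.1 + 1, st.2) else st) init
    = pvRowB (pvPairs d i (il.getD i "") n) init := by
  rw [PySem.List.pyRange_zero_nat, List.foldl_map, pvRowB, pvPairs, List.foldl_map]
  apply PySem.List.foldl_congr_mem
  intro acc j hj
  have hj' : j < n := List.mem_range.mp hj
  have hlt : j < (il.getD i "").toList.length := lt_of_lt_of_le hj' hs
  have hchar : PySem.Str.pyGet? (il.getD i "") (j : Int)
      = some ((il.getD i "").toList.getD j ' ') := by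
    rw [PySem.Str.pyGet?_natCast, List.getElem?_eq_getElem hlt, List.getD_eq_getElem _ _ hlt]
  simp only [hchar, Option.getD_some, pvBStep]

theorem pvA_eq (r0 : String) (rest : List String) (d : List (List Int × Int))
    (hlen : ∀ s ∈ (r0 :: rest : List String), r0.toList.length ≤ s.toList.length) :
    count_inside_loop (r0 :: rest) d =
      ((List.range (r0 :: rest : List String).length).foldl
        (fun acc i => acc.bind (fun num =>
          (pvRowA (pvPairs d i ((r0 :: rest : List String).getD i "") r0.toList.length)
            (some (num, false, ([] : List Char)))).map (fun s => s.1)))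
        (some 0)).getD 0 := by
  simp only [count_inside_loop, PySem.List.pyGet?_zero_cons, PySem.Str.len_eq]
  rw [PySem.List.pyRange_zero_nat (r0 :: rest : List String).length, List.foldl_map]
  congr 1
  apply PySem.List.foldl_congr_mem
  intro acc i hi
  have hi' : i < (r0 :: rest : List String).length := List.mem_range.mp hi
  have hs : r0.toList.length ≤ ((r0 :: rest : List String).getD i "").toList.length := by
    apply hlen
    rw [List.getD_eq_getElem _ _ hi']
    exact List.getElem_mem hi'
  congr 1
  funext num
  rw [pvBridgeA (r0 :: rest) d i r0.toList.length hi' hs]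

theorem pvB_eq (r0 : String) (rest : List String) (d : List (List Int × Int))
    (hlen : ∀ s ∈ (r0 :: rest : List String), r0.toList.length ≤ s.toList.length) :
    count_inside_loop_alt (r0 :: rest) d =
      (List.range (r0 :: rest : List String).length).foldl
        (fun num i =>
          (pvRowB (pvPairs d i ((r0 :: rest : List String).getD i "") r0.toList.length)
            (num, false)).1) 0 := by
  have h0 : PySem.List.pyGetD (r0 :: rest) 0 "" = r0 := by
    simp [PySem.List.pyGetD]
  simp only [count_inside_loop_alt, h0, PySem.Str.len_eq,
    PySem.List.enumerate_eq_map_pyRange (r0 :: rest) "", PySem.List.len_eq]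
  rw [PySem.List.pyRange_zero_nat (r0 :: rest : List String).length, List.map_map, List.foldl_map]
  apply PySem.List.foldl_congr_mem
  intro acc i hi
  have hi' : i < (r0 :: rest : List String).length := List.mem_range.mp hi
  have hs : r0.toList.length ≤ ((r0 :: rest : List String).getD i "").toList.length := by
    apply hlen
    rw [List.getD_eq_getElem _ _ hi']
    exact List.getElem_mem hi'
  have hp : ((fun j => ((j : Int), PySem.List.pyGetD (r0 :: rest) j "")) ∘ fun k : Nat => (k : Int)) i
      = ((i : Int), (r0 :: rest : List String).getD i "") := by
    simp
  rw [hp]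
  exact congrArg Prod.fst (pvBridgeB (r0 :: rest) d i r0.toList.length hs (acc, false))

-- ===== VERDICT (by name: the statement is the Claim_ definition above) =====
theorem count_inside_loop_spec : Claim_equal_count_inside_loop := by
  unfold Claim_equal_count_inside_loop
  intro il d _ hpre
  obtain ⟨hne, hlen, hrows⟩ := hpre
  obtain ⟨r0, rest, rfl⟩ := List.exists_cons_of_ne_nil hne
  unfold Spec_count_inside_loop
  have hlen' : ∀ s ∈ (r0 :: rest : List String), r0.toList.length ≤ s.toList.length := by
    simpa using hlen
  rw [pvA_eq r0 rest d hlen', pvB_eq r0 rest d hlen']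
  rw [PySem.List.foldl_congr_mem (List.range (r0 :: rest : List String).length) _
      (fun acc i => acc.bind (fun num => some
        ((pvRowB (pvPairs d i ((r0 :: rest : List String).getD i "") r0.toList.length)
          (num, false)).1))) (some 0) ?_]
  · rw [pvFoldMap]
    rfl
  · intro acc i hi
    have hi' : i < (r0 :: rest : List String).length := List.mem_range.mp hi
    have hok := hrows i hi'
    simp only [List.headD_cons] at hok
    congr 1
    funext num
    exact pvRow_eq _ num hok
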